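-- pv_equiv track=rewrite | github.com/aguscoppe/ejercicios-python | TP_5_Funciones/TP5_EJ13.py | devolverDigitos
-- ===== SOURCE A (Python) =====
-- def devolverDigitos(n, digitos):
--     dig = 0
--     resultado = 0
--     copia = n
--     multi = 1
--     while digitos != 0:
--         dig = n % 10
--         n = n // 10
--         resultado = resultado + dig * multi
--         multi = multi * 10
--         digitos = digitos - 1
--         if resultado == copia:
--             digitos = 0
--     return resultado
-- ===== SOURCE B (Python) =====
-- def devolverDigitos(n, digitos):
--     if n >= 0:
--         # n < 2**bit_length <= 10**bit_length, so larger exponents change nothing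
--         digitos = min(digitos, n.bit_length())
--     return n % (10 ** digitos)
-- ===== Notes on version B (the rewrite author's own statement) =====
-- stated objective: simpler
-- what changed: Replaces A's digit-by-digit reconstruction loop (extract n%10, rebuild with growing powers of ten, early exit) with the closed form n % 10**digitos, the exponent capped at n.bit_length() for nonnegative n so huge digit counts stay cheap.
-- outside the precondition, e.g. on devolverDigitos(5, -1): A returns 5, B returns 0.09999999999999973
import Mathlib
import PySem

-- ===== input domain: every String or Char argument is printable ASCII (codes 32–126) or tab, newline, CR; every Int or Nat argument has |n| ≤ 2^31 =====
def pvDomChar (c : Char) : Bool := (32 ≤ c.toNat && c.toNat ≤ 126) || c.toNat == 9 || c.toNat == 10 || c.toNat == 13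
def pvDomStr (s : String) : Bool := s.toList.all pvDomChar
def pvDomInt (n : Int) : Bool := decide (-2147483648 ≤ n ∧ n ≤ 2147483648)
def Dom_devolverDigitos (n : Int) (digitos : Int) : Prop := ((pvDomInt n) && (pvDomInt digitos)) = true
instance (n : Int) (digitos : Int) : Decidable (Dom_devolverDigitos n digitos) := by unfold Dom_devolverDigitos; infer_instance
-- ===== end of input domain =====

-- B replaces A's digit-by-digit reconstruction loop by the closed form n % 10**digitos, capping the exponent at n.bit_length() for nonnegative n (simpler).

-- ===== PORT A =====
-- the while loop of A, counted down by `digitos` (Nat fuel = the loop's own counter);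
-- state: current n, resultado, multi, and the saved copia.  The early exit
-- (`if resultado == copia: digitos = 0`) becomes the `if` returning resultado.
def devolverDigitosLoop (n resultado multi copia : Int) : Nat → Int
  | 0 => resultado
  | Nat.succ k =>
      let dig := PySem.Int.mod n 10
      let n' := PySem.Int.floordiv n 10
      let resultado' := resultado + dig * multi
      if resultado' = copia then resultado'
      else devolverDigitosLoop n' resultado' (multi * 10) copia k

def devolverDigitos (n : Int) (digitos : Int) : Int :=
  devolverDigitosLoop n 0 1 n digitos.toNat

-- ===== PORT B =====
def devolverDigitos_alt (n : Int) (digitos : Int) : Int :=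
  let digitos' := if 0 ≤ n then min digitos (PySem.Int.bitLength n : Int) else digitos
  PySem.Int.mod n (10 ^ digitos'.toNat)

-- ===== PRECONDITION & SPEC =====
-- Pre_ excludes digitos < 0: there B's `10 ** digitos` is a float so B returns a
-- float (not an int), while A diverges (n < 0) or returns n via its early exit (n ≥ 0).
def Pre_devolverDigitos (n : Int) (digitos : Int) : Prop := 0 ≤ digitos
instance (n : Int) (digitos : Int) : Decidable (Pre_devolverDigitos n digitos) := by unfold Pre_devolverDigitos; infer_instance
def pvWitness_devolverDigitos : Int × Int := (-7, 2)

def Spec_devolverDigitos (n : Int) (digitos : Int) (out : Int) : Prop := out = devolverDigitos_alt n digitos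
instance (n : Int) (digitos : Int) (out : Int) : Decidable (Spec_devolverDigitos n digitos out) := by unfold Spec_devolverDigitos; infer_instance

-- ===== CLAIM (what is proved, stated in full; the proofs are below) =====
def Claim_equal_devolverDigitos : Prop := ∀ (n : Int) (digitos : Int), Dom_devolverDigitos n digitos → Pre_devolverDigitos n digitos → Spec_devolverDigitos n digitos (devolverDigitos n digitos)

-- ===== LEMMAS AND PROOFS =====

-- one digit step: c % 10^j + ((c / 10^j) % 10) * 10^j = c % 10^(j+1)  (ediv/emod)
lemma emod_step (c : Int) (j : Nat) :
    c % (10 ^ j : Int) + ((c / (10 ^ j : Int)) % 10) * 10 ^ j = c % (10 ^ (j + 1) : Int) := by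
  have ha : (0:Int) ≤ 10 ^ j := by positivity
  have hdd : c / (10 ^ j : Int) / 10 = c / ((10 ^ j : Int) * 10) :=
    Int.ediv_ediv_of_nonneg ha
  rw [pow_succ, Int.emod_def, Int.emod_def, Int.emod_def, ← hdd]
  ring

-- loop invariant: from state (c / 10^j, c % 10^j, 10^j, c) the loop with fuel k computes c % 10^(j+k)
lemma loopInv (k : Nat) (c : Int) : ∀ j : Nat,
    devolverDigitosLoop (c / (10 ^ j : Int)) (c % (10 ^ j : Int)) (10 ^ j) c k
      = c % (10 ^ (j + k) : Int) := by
  induction k with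
  | zero => intro j; simp [devolverDigitosLoop]
  | succ k ih =>
    intro j
    have hpos : (0:Int) < 10 ^ j := by positivity
    have hmod : PySem.Int.mod (c / (10 ^ j : Int)) 10 = (c / (10 ^ j : Int)) % 10 :=
      PySem.Int.mod_eq_emod_of_pos (by norm_num)
    have hdiv : PySem.Int.floordiv (c / (10 ^ j : Int)) 10 = c / (10 ^ j : Int) / 10 :=
      PySem.Int.floordiv_eq_ediv_of_pos (by norm_num)
    have hdd : c / (10 ^ j : Int) / 10 = c / (10 ^ (j+1) : Int) := by
      rw [pow_succ]; exact Int.ediv_ediv_of_nonneg (by positivity)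
    have hres : c % (10 ^ j : Int) + (c / (10 ^ j : Int)) % 10 * 10 ^ j
        = c % (10 ^ (j + 1) : Int) := emod_step c j
    simp only [devolverDigitosLoop, hmod, hdiv, hdd, hres]
    split_ifs with h
    · -- early exit: c % 10^(j+1) = c, so c already fits, and higher moduli leave it fixed
      have h0 : (0:Int) ≤ c := h ▸ Int.emod_nonneg c (by positivity)
      have h1 : c < 10 ^ (j + 1) := h ▸ Int.emod_lt_of_pos c (by positivity)
      have h2 : c < 10 ^ (j + (k + 1)) :=
        lt_of_lt_of_le h1 (pow_le_pow_right₀ (by norm_num) (by omega))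
      rw [h, Int.emod_eq_of_lt h0 h2]
    · have hm : (10 ^ j : Int) * 10 = 10 ^ (j + 1) := (pow_succ 10 j).symm
      rw [hm, ih (j + 1), show j + 1 + k = j + (k + 1) by omega]

-- ===== VERDICT (by name: the statement is the Claim_ definition above) =====
-- capping the exponent at bitLength does not change the residue for 0 ≤ n
lemma emod_cap (n : Int) (hn : 0 ≤ n) (a b : Nat) (ha : PySem.Int.bitLength n ≤ a)
    (hb : PySem.Int.bitLength n ≤ b) : n % (10 ^ a : Int) = n % (10 ^ b : Int) := by
  have hlt : n.natAbs < 2 ^ PySem.Int.bitLength n := PySem.Int.lt_two_pow_bitLength n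
  have key : ∀ c : Nat, PySem.Int.bitLength n ≤ c → n % (10 ^ c : Int) = n := by
    intro c hc
    have h1 : n < 10 ^ c := by
      have : (n.natAbs : Int) < ((2 ^ PySem.Int.bitLength n : Nat) : Int) := by exact_mod_cast hlt
      have h2 : ((2 ^ PySem.Int.bitLength n : Nat) : Int) ≤ 10 ^ c := by
        push_cast
        calc (2:Int) ^ PySem.Int.bitLength n ≤ 2 ^ c := by
              exact pow_le_pow_right₀ (by norm_num) hc
          _ ≤ 10 ^ c := by exact pow_le_pow_left₀ (by norm_num) (by norm_num) c
      calc n ≤ (n.natAbs : Int) := Int.le_natAbs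
        _ < 10 ^ c := lt_of_lt_of_le this h2
    exact Int.emod_eq_of_lt hn h1
  rw [key a ha, key b hb]

theorem devolverDigitos_spec : Claim_equal_devolverDigitos := by
  intro n digitos _ hpre
  unfold Spec_devolverDigitos devolverDigitos devolverDigitos_alt
  have h := loopInv digitos.toNat n 0
  simp only [pow_zero, Int.ediv_one, Int.emod_one, Nat.zero_add] at h
  rw [h, PySem.Int.mod_eq_emod_of_pos (by positivity)]

  split_ifs with hn
  · rcases le_total digitos (PySem.Int.bitLength n : Int) with hle | hle
    · rw [min_eq_left hle]
    · rw [min_eq_right hle]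
      exact emod_cap n hn _ _ (by omega) (by simp)
  · rfl
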